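-- pv_equiv track=rewrite | github.com/SlainTroyard/FuzzForLeetcode | C_CPP/C/constraints/before-temp/weekly_contest_418_p3_fuzz.py | generate_grid_layout
-- ===== SOURCE A (Python) =====
-- import math
--
-- def generate_grid_layout(n):
--     cols = math.isqrt(n)
--     while cols > 1:
--         if n % cols == 0:
--             rows = n // cols
--             break
--         cols -= 1
--     else:
--         rows = math.isqrt(n)
--         cols = math.ceil(n / rows)
--
--     grid = [[-1 for _ in range(cols)] for _ in range(rows)]
--     node = 0
--     for r in range(rows):
--         for c in range(cols):
--             if node < n:
--                 grid[r][c] = node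
--                 node += 1
--             else:
--                 break
--     return grid, rows, cols
-- ===== SOURCE B (Python) =====
-- import math
--
-- def generate_grid_layout(n):
--     s = math.isqrt(n)
--     best = 0
--     for d in range(2, s + 1):
--         if n % d == 0:
--             best = d
--     if best:
--         cols = best
--         rows = n // cols
--     else:
--         rows = s
--         cols = -(-n // rows)
--     flat = list(range(n)) + [-1] * (rows * cols - n)
--     grid = [flat[r * cols:(r + 1) * cols] for r in range(rows)]
--     return grid, rows, cols
-- ===== Notes on version B (the rewrite author's own statement) =====
-- stated objective: alternative
-- what changed: B replaces A's downward while-loop that breaks at the first divisor below isqrt(n) by an ascending scan 2..isqrt(n) that keeps the LAST divisor seen, and replaces the nested element-by-element grid fill with break by building one flat padded list and reshaping it with slices.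
-- outside the precondition, e.g. on generate_grid_layout(0): A raises ZeroDivisionError, B raises ZeroDivisionError
import Mathlib
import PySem

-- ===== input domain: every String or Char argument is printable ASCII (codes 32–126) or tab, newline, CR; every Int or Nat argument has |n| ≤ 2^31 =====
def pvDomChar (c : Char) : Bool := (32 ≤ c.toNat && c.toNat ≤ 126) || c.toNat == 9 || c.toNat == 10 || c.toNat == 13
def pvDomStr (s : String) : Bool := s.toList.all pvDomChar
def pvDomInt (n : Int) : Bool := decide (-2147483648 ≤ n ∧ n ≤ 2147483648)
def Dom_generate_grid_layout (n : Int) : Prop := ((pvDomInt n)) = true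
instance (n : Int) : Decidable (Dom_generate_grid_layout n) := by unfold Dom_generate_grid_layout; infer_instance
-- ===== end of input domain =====

-- B finds the divisor by an ascending keep-the-last scan (A breaks at the first going down)
-- and builds the grid by slicing one flat padded list (A fills element by element with a break);
-- objective: alternative (same asymptotic cost, different structure).


-- ===== PORT A =====
-- math.isqrt(n); exact for n ≥ 0 (Pre_ excludes n < 0, where Python raises ValueError)
def pvIsqrt (n : Int) : Int := (n.toNat.sqrt : Int)

-- the 'while cols > 1' loop: returns some (rows, cols) on break, none when the loop falls
-- through to its else; fuel cols.toNat + 1 is always enough since cols decreases by 1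
def pvLoopA (n : Int) : Nat → Int → Option (Int × Int)
  | 0, _ => none
  | f + 1, cols =>
    if cols > 1 then
      if PySem.Int.mod n cols == 0 then some (PySem.Int.floordiv n cols, cols)
      else pvLoopA n f (cols - 1)
    else none

-- grid[r][c] = v; exact here since A only executes it with 0 ≤ r < len(grid), 0 ≤ c < len(grid[r])
def pvSet2 (g : List (List Int)) (r c v : Int) : List (List Int) :=
  g.set r.toNat ((g.getD r.toNat []).set c.toNat v)

-- inner 'for c in range(cols)' with its break
def pvFillInner (n r : Int) : List Int → List (List Int) → Int → List (List Int) × Int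
  | [], g, node => (g, node)
  | c :: cs, g, node =>
    if node < n then pvFillInner n r cs (pvSet2 g r c node) (node + 1) else (g, node)

-- outer 'for r in range(rows)'
def pvFillOuter (n cols : Int) : List Int → List (List Int) → Int → List (List Int) × Int
  | [], g, node => (g, node)
  | r :: rs, g, node =>
    let p := pvFillInner n r (PySem.List.pyRange 0 cols 1) g node
    pvFillOuter n cols rs p.1 p.2

def generate_grid_layout (n : Int) : List (List Int) × Int × Int :=
  let colsInit := pvIsqrt n
  let rc :=
    match pvLoopA n (colsInit.toNat + 1) colsInit with
    | some rc => rc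
    | none =>
      let rows := pvIsqrt n
      -- math.ceil(n / rows) ported as the integer ceiling -((-n) // rows): exact on the domain
      -- (1 ≤ n ≤ 2^31, rows = isqrt(n): the float quotient cannot round across an integer)
      (rows, -(PySem.Int.floordiv (-n) rows))
  let rows := rc.1
  let cols := rc.2
  let grid := List.replicate rows.toNat (List.replicate cols.toNat (-1))
  let res := pvFillOuter n cols (PySem.List.pyRange 0 rows 1) grid 0
  (res.1, rows, cols)

-- ===== PORT B =====
def generate_grid_layout_alt (n : Int) : List (List Int) × Int × Int :=
  let s : Int := (n.toNat.sqrt : Int)   -- math.isqrt(n), as in port A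
  let best := (PySem.List.pyRange 2 (s + 1) 1).foldl
      (fun b d => if PySem.Int.mod n d == 0 then d else b) 0
  let rc := if best ≠ 0 then (PySem.Int.floordiv n best, best)
            else (s, -(PySem.Int.floordiv (-n) s))   -- cols = -(-n // rows)
  let rows := rc.1
  let cols := rc.2
  let flat := PySem.List.pyRange 0 n 1 ++ List.replicate (rows * cols - n).toNat (-1)
  let grid := (PySem.List.pyRange 0 rows 1).map
      (fun r => PySem.List.slice flat (some (r * cols)) (some ((r + 1) * cols)))
  (grid, rows, cols)

-- ===== PRECONDITION & SPEC =====
-- Pre_ excludes exactly n ≤ 0: there A raises (ValueError from math.isqrt for n < 0,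
-- ZeroDivisionError for n = 0); it admits every input A returns on.
def Pre_generate_grid_layout (n : Int) : Prop := 1 ≤ n
instance (n : Int) : Decidable (Pre_generate_grid_layout n) := by unfold Pre_generate_grid_layout; infer_instance
def pvWitness_generate_grid_layout : Int := 6

def Spec_generate_grid_layout (n : Int) (out : List (List Int) × Int × Int) : Prop := out = generate_grid_layout_alt n
instance (n : Int) (out : List (List Int) × Int × Int) : Decidable (Spec_generate_grid_layout n out) := by unfold Spec_generate_grid_layout; infer_instance

-- ===== CLAIM (what is proved, stated in full; the proofs are below) =====
def Claim_equal_generate_grid_layout : Prop := ∀ (n : Int), Dom_generate_grid_layout n → Pre_generate_grid_layout n → Spec_generate_grid_layout n (generate_grid_layout n)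

-- ===== LEMMAS AND PROOFS =====

-- row-level mirror of pvFillInner (proof device)
def pvRowFill (n : Int) : List Int → List Int → Int → List Int × Int
  | [], row, node => (row, node)
  | c :: cs, row, node =>
    if node < n then pvRowFill n cs (row.set c.toNat node) (node + 1) else (row, node)

-- the content of a row that starts being filled at node value m
def pvTargetRow (n cols m : Int) : List Int :=
  PySem.List.pyRange m (min (m + cols) n) 1 ++
    List.replicate (cols.toNat - (min (m + cols) n - m).toNat) (-1)

lemma take_set_succ {α : Type} (l : List α) (i : Nat) (a : α) (h : i < l.length) :
    (l.set i a).take (i+1) = l.take i ++ [a] := by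
  rw [List.set_eq_take_append_cons_drop, if_pos h, List.take_append]
  simp [List.length_take, Nat.min_eq_left (Nat.le_of_lt h)]

-- A's downward first-divisor search agrees with B's ascending keep-the-last fold
lemma loopA_eq_best (n : Int) : ∀ (k : Nat) (c : Int), c.toNat = k → 0 ≤ c →
    pvLoopA n (k + 1) c =
      (let b := (PySem.List.pyRange 2 (c + 1) 1).foldl
          (fun b d => if PySem.Int.mod n d == 0 then d else b) 0
       if b = 0 then none else some (PySem.Int.floordiv n b, b)) := by
  intro k
  induction k with
  | zero =>
    intro c hk hc
    have : c = 0 := by omega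
    subst this
    simp [pvLoopA, PySem.List.pyRange_one_eq_nil (by omega : (1:Int) ≤ 2)]
  | succ k ih =>
    intro c hk hc
    by_cases h2 : (2:Int) ≤ c
    · have hsplit : PySem.List.pyRange 2 (c + 1) 1 = PySem.List.pyRange 2 c 1 ++ [c] :=
        PySem.List.pyRange_one_succ_right h2
      by_cases hm : PySem.Int.mod n c = 0
      · conv_lhs => rw [pvLoopA]
        simp [hsplit, List.foldl_append, hm, show (1:Int) < c by omega, show c ≠ 0 by omega]
      · have hrec := ih (c - 1) (by omega) (by omega)
        simp only [show c - 1 + 1 = c by ring] at hrec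
        have hstep : pvLoopA n (k + 1 + 1) c = pvLoopA n (k + 1) (c - 1) := by
          conv_lhs => rw [pvLoopA]
          simp [show (1:Int) < c by omega, hm]
        rw [hstep, hrec]
        simp [hsplit, List.foldl_append, hm]
    · have hnil : PySem.List.pyRange 2 (c + 1) 1 = [] :=
        PySem.List.pyRange_one_eq_nil (by omega)
      conv_lhs => rw [pvLoopA]
      simp [hnil, show ¬ (1:Int) < c by omega]

-- the fold's result is its start value or a divisor taken from the list
lemma best_mem (n : Int) (l : List Int) (init : Int) :
    l.foldl (fun b d => if PySem.Int.mod n d == 0 then d else b) init = init ∨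
      (l.foldl (fun b d => if PySem.Int.mod n d == 0 then d else b) init ∈ l ∧
        PySem.Int.mod n (l.foldl (fun b d => if PySem.Int.mod n d == 0 then d else b) init) = 0) := by
  induction l generalizing init with
  | nil => exact Or.inl rfl
  | cons d t ih =>
    simp only [List.foldl_cons]
    rcases ih (if PySem.Int.mod n d == 0 then d else init) with h | h
    · rw [h]
      by_cases hd : PySem.Int.mod n d = 0
      · simp [hd]
      · simp [hd]
    · exact Or.inr ⟨List.mem_cons_of_mem _ h.1, h.2⟩

lemma fillInner_eq_rowFill (n r : Int) : ∀ (cs : List Int) (g : List (List Int)) (node : Int),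
    r.toNat < g.length →
    pvFillInner n r cs g node =
      (g.set r.toNat (pvRowFill n cs (g.getD r.toNat []) node).1,
       (pvRowFill n cs (g.getD r.toNat []) node).2) := by
  intro cs
  induction cs with
  | nil =>
    intro g node hr
    simp [pvFillInner, pvRowFill, List.getElem?_eq_getElem hr, List.set_getElem_self hr]
  | cons c t ih =>
    intro g node hr
    simp only [pvFillInner, pvRowFill]
    by_cases h : node < n
    · simp only [h, if_pos]
      have hr' : r.toNat < (pvSet2 g r c node).length := by
        simpa [pvSet2] using hr
      rw [ih _ _ hr']
      have hget : (pvSet2 g r c node).getD r.toNat [] = (g.getD r.toNat []).set c.toNat node := by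
        simp [pvSet2, hr]
      rw [hget]
      simp [pvSet2, List.set_set]
    · simp [h, List.getElem?_eq_getElem hr, List.set_getElem_self hr]

lemma rowFill_spec (n cols : Int) : ∀ (k : Nat) (j : Int) (row : List Int) (m : Int),
    0 ≤ j → j + k = cols → row.length = cols.toNat → m ≤ n →
    pvRowFill n (PySem.List.pyRange j cols 1) row m =
      (row.take j.toNat ++ PySem.List.pyRange m (min (m + (cols - j)) n) 1 ++
        row.drop (j.toNat + (min (m + (cols - j)) n - m).toNat),
       min (m + (cols - j)) n) := by
  intro k
  induction k with
  | zero =>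
    intro j row m hj hjk hlen hm
    have hjc : j = cols := by omega
    subst hjc
    rw [PySem.List.pyRange_one_eq_nil le_rfl]
    simp only [pvRowFill]
    rw [Prod.mk.injEq]
    constructor
    · rw [show m + (j - j) = m by ring, min_eq_left hm]
      simp
    · omega
  | succ k ih =>
    intro j row m hj hjk hlen hm
    have hjc : j < cols := by omega
    rw [PySem.List.pyRange_one_cons hjc]
    simp only [pvRowFill]
    by_cases hmn : m < n
    · rw [if_pos hmn]
      have hjr : j.toNat < row.length := by omega
      have ihr := ih (j + 1) (row.set j.toNat m) (m + 1) (by omega) (by omega)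
        (by simpa using hlen) (by omega)
      rw [ihr]
      have hnode : min (m + 1 + (cols - (j + 1))) n = min (m + (cols - j)) n := by
        congr 1; ring
      rw [hnode]
      have hlt : m < min (m + (cols - j)) n := by
        have : m + 1 ≤ m + (cols - j) := by omega
        omega
      have hj1 : (j + 1).toNat = j.toNat + 1 := by omega
      rw [Prod.mk.injEq]
      refine ⟨?_, rfl⟩
      rw [hj1, take_set_succ row j.toNat m hjr,
          List.drop_set_of_lt (by omega : j.toNat < j.toNat + 1 + (min (m + (cols - j)) n - (m + 1)).toNat)]
      rw [show PySem.List.pyRange m (min (m + (cols - j)) n) 1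
            = m :: PySem.List.pyRange (m + 1) (min (m + (cols - j)) n) 1 from
          PySem.List.pyRange_one_cons hlt]
      have hidx : j.toNat + 1 + (min (m + (cols - j)) n - (m + 1)).toNat
          = j.toNat + (min (m + (cols - j)) n - m).toNat := by omega
      rw [hidx]
      simp
    · rw [if_neg hmn]
      have : min (m + (cols - j)) n = m := by omega
      rw [this]
      simp [PySem.List.pyRange_one_eq_nil (le_refl m)]

lemma fillOuter_spec (n cols rows : Int) (hc : 0 ≤ cols) :
    ∀ (k : Nat) (j : Int) (g : List (List Int)),
    0 ≤ j → j + k = rows → g.length = rows.toNat →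
    (∀ i : Nat, j.toNat ≤ i → (hi : i < g.length) → g[i] = List.replicate cols.toNat (-1)) →
    (pvFillOuter n cols (PySem.List.pyRange j rows 1) g (min (j * cols) n)).1 =
      g.take j.toNat ++ (PySem.List.pyRange j rows 1).map (fun r => pvTargetRow n cols (min (r * cols) n)) := by
  intro k
  induction k with
  | zero =>
    intro j g hj hjk hlen hrep
    have hjr : j = rows := by omega
    subst hjr
    rw [PySem.List.pyRange_one_eq_nil le_rfl]
    simp [pvFillOuter, List.take_of_length_le (by omega : g.length ≤ j.toNat)]
  | succ k ih =>
    intro j g hj hjk hlen hrep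
    have hjr : j < rows := by omega
    rw [PySem.List.pyRange_one_cons hjr]
    simp only [pvFillOuter]
    have hjg : j.toNat < g.length := by omega
    rw [fillInner_eq_rowFill n j _ g _ hjg]
    have hgd : g.getD j.toNat [] = List.replicate cols.toNat (-1) := by
      rw [List.getD_eq_getElem _ _ hjg, hrep j.toNat le_rfl hjg]
    rw [hgd]
    have hrf := rowFill_spec n cols cols.toNat 0 (List.replicate cols.toNat (-1))
      (min (j * cols) n) le_rfl (by omega) (by simp) (by omega)
    have hsub : cols - 0 = cols := by ring
    rw [hsub] at hrf
    simp only [Int.toNat_zero, List.take_zero, List.nil_append, Nat.zero_add] at hrf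
    rw [hrf]
    have hrow : List.drop (min (min (j * cols) n + cols) n - min (j * cols) n).toNat
        (List.replicate cols.toNat (-1 : Int)) =
        List.replicate (cols.toNat - (min (min (j * cols) n + cols) n - min (j * cols) n).toNat) (-1) := by
      rw [List.drop_replicate]
    have htarget : PySem.List.pyRange (min (j * cols) n) (min (min (j * cols) n + cols) n) 1 ++
        List.drop (min (min (j * cols) n + cols) n - min (j * cols) n).toNat
          (List.replicate cols.toNat (-1 : Int)) = pvTargetRow n cols (min (j * cols) n) := by
      rw [hrow]; rfl
    have hm' : min (min (j * cols) n + cols) n = min ((j + 1) * cols) n := by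
      have : (j + 1) * cols = j * cols + cols := by ring
      omega
    set g' := g.set j.toNat (PySem.List.pyRange (min (j * cols) n) (min (min (j * cols) n + cols) n) 1 ++
        List.drop (min (min (j * cols) n + cols) n - min (j * cols) n).toNat
          (List.replicate cols.toNat (-1 : Int))) with hg'
    have hih := ih (j + 1) g' (by omega) (by omega) (by simp [hg', hlen])
      (by
        intro i hi1 hi2
        have hne : j.toNat ≠ i := by omega
        simp only [hg'] at hi2 ⊢
        rw [List.getElem_set_ne hne]
        exact hrep i (by omega) (by simpa using hi2))
    dsimp only
    rw [hm', hih]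
    have htake : g'.take (j + 1).toNat = g.take j.toNat ++ [pvTargetRow n cols (min (j * cols) n)] := by
      rw [hg', show (j + 1).toNat = j.toNat + 1 by omega, take_set_succ _ _ _ hjg, htarget]
    rw [htake]
    simp [List.map_cons]

lemma slice_flat (n cols rows : Int) (hn : 1 ≤ n) (hc : 0 ≤ cols) (hcover : n ≤ rows * cols) :
    ∀ r : Int, 0 ≤ r → r < rows →
    PySem.List.slice (PySem.List.pyRange 0 n 1 ++ List.replicate (rows * cols - n).toNat (-1))
        (some (r * cols)) (some ((r + 1) * cols)) =
      pvTargetRow n cols (min (r * cols) n) := by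
  intro r hr hrrows
  have ha : 0 ≤ r * cols := mul_nonneg hr hc
  have hb : 0 ≤ (r + 1) * cols := mul_nonneg (by omega) hc
  have hstep : (r + 1) * cols = r * cols + cols := by ring
  have hmul : (r + 1) * cols ≤ rows * cols := mul_le_mul_of_nonneg_right (by omega) hc
  rw [PySem.List.slice_toNat _ ha hb]
  have hBA : ((r + 1) * cols).toNat - (r * cols).toNat = cols.toNat := by omega
  rw [hBA]
  by_cases hm : n ≤ r * cols
  · -- the row is entirely padding
    have hmin : min (r * cols) n = n := by omega
    rw [hmin]
    have hdrop : (PySem.List.pyRange 0 n 1 ++ List.replicate (rows * cols - n).toNat (-1 : Int)).drop (r * cols).toNat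
        = List.replicate ((rows * cols - n).toNat - ((r * cols).toNat - n.toNat)) (-1) := by
      rw [List.drop_append, List.drop_replicate, PySem.List.length_pyRange_one]
      have : (PySem.List.pyRange 0 n 1).drop (r * cols).toNat = [] := by
        apply List.drop_eq_nil_of_le
        rw [PySem.List.length_pyRange_one]
        omega
      rw [this]
      simp
    rw [hdrop, List.take_replicate]
    have hK : min cols.toNat ((rows * cols - n).toNat - ((r * cols).toNat - n.toNat)) = cols.toNat := by
      have hx := hstep
      omega
    rw [hK]
    unfold pvTargetRow
    have h1 : min (n + cols) n = n := by omega
    rw [h1]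
    simp [PySem.List.pyRange_one_eq_nil (le_refl n)]
  · -- the row starts inside range(n)
    rw [not_le] at hm
    have hmin : min (r * cols) n = r * cols := by omega
    rw [hmin]
    have hsplitP : PySem.List.pyRange 0 n 1
        = PySem.List.pyRange 0 (r * cols) 1 ++ PySem.List.pyRange (r * cols) n 1 :=
      PySem.List.pyRange_one_append 0 (r * cols) n ha (by omega)
    have hlenP : (PySem.List.pyRange 0 (r * cols) 1).length = (r * cols).toNat := by
      rw [PySem.List.length_pyRange_one]; omega
    have hdrop : (PySem.List.pyRange 0 n 1 ++ List.replicate (rows * cols - n).toNat (-1 : Int)).drop (r * cols).toNat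
        = PySem.List.pyRange (r * cols) n 1 ++ List.replicate (rows * cols - n).toNat (-1) := by
      rw [hsplitP, List.append_assoc, ← hlenP, List.drop_left]
    rw [hdrop]
    unfold pvTargetRow
    by_cases hfit : r * cols + cols ≤ n
    · have hmin2 : min (r * cols + cols) n = r * cols + cols := by omega
      rw [hmin2]
      have hsplitQ : PySem.List.pyRange (r * cols) n 1
          = PySem.List.pyRange (r * cols) (r * cols + cols) 1 ++ PySem.List.pyRange (r * cols + cols) n 1 :=
        PySem.List.pyRange_one_append _ _ _ (by omega) (by omega)
      rw [hsplitQ, List.append_assoc, List.take_append]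
      have hlenQ : (PySem.List.pyRange (r * cols) (r * cols + cols) 1).length = cols.toNat := by
        rw [PySem.List.length_pyRange_one]; omega
      rw [List.take_of_length_le (by omega : (PySem.List.pyRange (r * cols) (r * cols + cols) 1).length ≤ cols.toNat),
          hlenQ]
      simp
    · rw [not_le] at hfit
      have hmin2 : min (r * cols + cols) n = n := by omega
      rw [hmin2]
      rw [List.take_append]
      have hlenQ : (PySem.List.pyRange (r * cols) n 1).length = (n - r * cols).toNat := by
        rw [PySem.List.length_pyRange_one]
      rw [List.take_of_length_le (by omega : (PySem.List.pyRange (r * cols) n 1).length ≤ cols.toNat)]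
      rw [hlenQ, List.take_replicate]
      have : min (cols.toNat - (n - r * cols).toNat) (rows * cols - n).toNat
          = cols.toNat - (n - r * cols).toNat := by
        have hx := hstep
        omega
      rw [this]

-- A's nested fill on a fresh -1 grid equals B's slicing of the flat padded list
lemma grid_eq (n rows cols : Int) (hn : 1 ≤ n) (hr : 0 ≤ rows) (hc : 0 ≤ cols)
    (hcov : n ≤ rows * cols) :
    (pvFillOuter n cols (PySem.List.pyRange 0 rows 1)
       (List.replicate rows.toNat (List.replicate cols.toNat (-1))) 0).1
    = (PySem.List.pyRange 0 rows 1).map (fun r =>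
        PySem.List.slice (PySem.List.pyRange 0 n 1 ++ List.replicate (rows * cols - n).toNat (-1))
          (some (r * cols)) (some ((r + 1) * cols))) := by
  have hmin0 : min (0 * cols) n = 0 := by rw [zero_mul]; omega
  have hfo := fillOuter_spec n cols rows hc rows.toNat 0
    (List.replicate rows.toNat (List.replicate cols.toNat (-1))) le_rfl (by omega)
    (by simp) (by intro i _ hi; simp)
  rw [hmin0] at hfo
  rw [hfo, Int.toNat_zero, List.take_zero, List.nil_append]
  apply List.map_congr_left
  intro r hrmem
  rw [PySem.List.mem_pyRange_one] at hrmem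
  exact (slice_flat n cols rows hn hc hcov r hrmem.1 hrmem.2).symm

-- ===== VERDICT (by name: the statement is the Claim_ definition above) =====
theorem generate_grid_layout_spec : Claim_equal_generate_grid_layout := by
  intro n hdom hpre
  have hn : 1 <= n := hpre
  unfold Spec_generate_grid_layout generate_grid_layout generate_grid_layout_alt
  simp only [pvIsqrt]
  rw [loopA_eq_best n ((n.toNat.sqrt : Int)).toNat (n.toNat.sqrt : Int) rfl (by positivity)]
  set s : Int := (n.toNat.sqrt : Int) with hs
  set b := (PySem.List.pyRange 2 (s + 1) 1).foldl
      (fun b d => if PySem.Int.mod n d == 0 then d else b) 0 with hbdef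
  have hs0 : 0 <= s := by positivity
  by_cases hb : b = 0
  · -- fallback branch: rows = isqrt n, cols = ceil(n / rows)
    rw [if_pos hb, if_neg (by simp [hb])]
    dsimp only
    have hs1 : 1 <= s := by
      have : 0 < n.toNat.sqrt := Nat.sqrt_pos.mpr (by omega)
      omega
    set q : Int := -(PySem.Int.floordiv (-n) s) with hq
    have hqb := (PySem.Int.neg_floordiv_neg_eq_iff_of_pos (by omega : 0 < s)).mp hq.symm
    have hcov : n <= s * q := by
      have h2 := hqb.2
      linarith [mul_comm q s]
    have hc : 0 <= q := by
      by_contra hneg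
      rw [not_le] at hneg
      have : q * s <= 0 := mul_nonpos_of_nonpos_of_nonneg (by omega) hs0
      omega
    rw [Prod.mk.injEq]
    exact ⟨grid_eq n s q hn hs0 hc hcov, rfl⟩
  · -- divisor branch: b is a divisor with 2 <= b <= s
    rw [if_neg hb, if_pos hb]
    dsimp only
    rcases best_mem n (PySem.List.pyRange 2 (s + 1) 1) 0 with h | h
    · exact absurd (hbdef.trans h) hb
    · have hmem := h.1
      rw [← hbdef] at hmem h
      rw [PySem.List.mem_pyRange_one] at hmem
      have hdvd : b ∣ n := (PySem.Int.mod_eq_zero_iff_dvd n b).mp h.2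
      have hbpos : 0 < b := by omega
      have hfd : PySem.Int.floordiv n b = n / b := PySem.Int.floordiv_eq_ediv_of_pos hbpos
      have hmulc : (n / b) * b = n := Int.ediv_mul_cancel hdvd
      have hrnn : 0 <= n / b := Int.ediv_nonneg (by omega) (by omega)
      have hcov : n <= PySem.Int.floordiv n b * b := by rw [hfd, hmulc]
      rw [Prod.mk.injEq]
      exact ⟨grid_eq n (PySem.Int.floordiv n b) b hn (by rw [hfd]; exact hrnn) (by omega) hcov, rfl⟩
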